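-- pv_equiv track=rewrite | github.com/vutuanhai237/Braces2TeethUtilities | evaluateData/visualize copy.py | reduceList
-- ===== SOURCE A (Python) =====
-- def reduceList(list, times):
--     i = 0
--     total = 0
--     newList = []
--     for elem in list:
--         if i == times:
--             newList.append(total)
--             i = 0
--             total = 0
--         else:
--             i = i + 1
--             total = total + elem
--     return newList
-- ===== SOURCE B (Python) =====
-- def reduceList(list, times):
--     if times < 0:
--         return []
--     result = []
--     while len(list) > times:
--         result.append(sum(list[:times]))
--         list = list[times + 1:]
--     return result
-- ===== Notes on version B (the rewrite author's own statement) =====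
-- stated objective: simpler
-- what changed: Replaces the element-by-element counter/reset state machine with direct slicing: while more than `times` elements remain, append sum(list[:times]) and drop times+1 elements; a `times < 0` guard replaces the counter never matching.
import Mathlib
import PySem

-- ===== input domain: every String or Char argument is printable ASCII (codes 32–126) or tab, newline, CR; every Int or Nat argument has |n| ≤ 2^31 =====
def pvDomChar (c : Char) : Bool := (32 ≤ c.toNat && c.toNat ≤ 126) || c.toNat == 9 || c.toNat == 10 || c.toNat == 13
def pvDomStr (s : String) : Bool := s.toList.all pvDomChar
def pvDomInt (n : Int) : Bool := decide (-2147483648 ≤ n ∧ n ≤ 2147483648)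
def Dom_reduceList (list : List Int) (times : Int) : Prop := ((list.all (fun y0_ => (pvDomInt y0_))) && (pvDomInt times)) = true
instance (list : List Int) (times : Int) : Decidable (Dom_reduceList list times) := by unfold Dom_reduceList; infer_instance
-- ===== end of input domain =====

-- B replaces A's counter/reset state machine with slice-and-sum over blocks (objective: simpler).

-- ===== PORT A =====
-- one iteration of A's for-loop body over the state (i, total, newList)
def stepA (times : Int) (s : Int × Int × List Int) (elem : Int) : Int × Int × List Int :=
  match s with
  | (i, total, newList) =>
    if i = times then (0, 0, newList ++ [total])
    else (i + 1, total + elem, newList)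

def reduceList (list : List Int) (times : Int) : List Int :=
  (list.foldl (stepA times) (0, 0, [])).2.2

-- ===== PORT B =====
-- B's while-loop; it runs only under the `times < 0` guard, so `times` is passed as the
-- Nat `t = times.toNat`, and the slices list[:times] / list[times+1:] (nonnegative bounds,
-- exact there) are List.take t / List.drop (t+1).
def altGo (t : Nat) (l : List Int) (result : List Int) : List Int :=
  if t < l.length then
    altGo t (l.drop (t + 1)) (result ++ [(l.take t).sum])
  else result
termination_by l.length
decreasing_by simp [List.length_drop]; omega

def reduceList_alt (list : List Int) (times : Int) : List Int :=
  if times < 0 then [] else altGo times.toNat list []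

-- ===== PRECONDITION & SPEC =====
def Spec_reduceList (list : List Int) (times : Int) (out : List Int) : Prop := out = reduceList_alt list times
instance (list : List Int) (times : Int) (out : List Int) : Decidable (Spec_reduceList list times out) := by unfold Spec_reduceList; infer_instance

-- ===== CLAIM (what is proved, stated in full; the proofs are below) =====
def Claim_equal_reduceList : Prop := ∀ (list : List Int) (times : Int), Dom_reduceList list times → Spec_reduceList list times (reduceList list times)

-- ===== LEMMAS AND PROOFS =====

-- when times < 0, A's counter i stays ≥ 0 and never hits times, so nothing is appended
theorem foldA_neg (times : Int) (ht : times < 0) :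
    ∀ (l : List Int) (i total : Int) (acc : List Int), 0 ≤ i →
      (l.foldl (stepA times) (i, total, acc)).2.2 = acc := by
  intro l
  induction l with
  | nil => intro i total acc _; simp
  | cons e l ih =>
    intro i total acc hi
    have hne : ¬ i = times := by omega
    simp [List.foldl, stepA, hne]
    exact ih (i + 1) (total + e) acc (by omega)

-- transition invariant of A's fold from an arbitrary in-progress state (i, total, acc)
theorem foldA_general (times : Int) (ht : 0 ≤ times) :
    ∀ (l : List Int) (i total : Int) (acc : List Int), 0 ≤ i → i ≤ times →
      l.foldl (stepA times) (i, total, acc) =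
        if (l.length : Int) ≥ times - i + 1 then
          (l.drop ((times - i).toNat + 1)).foldl (stepA times)
            (0, 0, acc ++ [total + (l.take (times - i).toNat).sum])
        else (i + l.length, total + l.sum, acc) := by
  intro l
  induction l with
  | nil =>
    intro i total acc hi hle
    have : ¬ ((0 : Int) ≥ times - i + 1) := by omega
    simp [this]
  | cons e l ih =>
    intro i total acc hi hle
    by_cases hit : i = times
    · subst hit
      simp [List.foldl, stepA]
    · have hlt : i < times := lt_of_le_of_ne hle hit
      have hn : (times - i).toNat = (times - (i+1)).toNat + 1 := by omega
      simp only [List.foldl, stepA, if_neg hit]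
      rw [ih (i+1) (total + e) acc (by omega) (by omega)]
      have hcond : ((l.length : Int) ≥ times - (i+1) + 1) ↔ (((e :: l).length : Int) ≥ times - i + 1) := by
        simp; omega
      by_cases hc : (l.length : Int) ≥ times - (i+1) + 1
      · rw [if_pos hc, if_pos (hcond.mp hc), hn]
        simp [List.take, List.drop]
        ring_nf
      · rw [if_neg hc, if_neg (fun h => hc (hcond.mpr h))]
        simp
        constructor
        · omega
        · omega

-- for nonnegative times, A's fold from a fresh state computes B's loop
theorem foldA_eq_altGo (times : Int) (ht : 0 ≤ times) :
    ∀ (l : List Int) (acc : List Int),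
      (l.foldl (stepA times) (0, 0, acc)).2.2 = altGo times.toNat l acc := by
  intro l
  induction hl : l.length using Nat.strong_induction_on generalizing l with
  | _ n ih =>
    intro acc
    rw [foldA_general times ht l 0 0 acc le_rfl ht]
    rw [altGo]
    have htn : ((times - 0).toNat : Int) = times := by omega
    by_cases hc : (l.length : Int) ≥ times - 0 + 1
    · have hc' : times.toNat < l.length := by omega
      rw [if_pos hc, if_pos hc']
      have hlen : (l.drop ((times - 0).toNat + 1)).length < n := by
        subst hl; simp; omega
      have := ih _ hlen (l.drop ((times - 0).toNat + 1)) rfl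
        (acc ++ [0 + (l.take (times - 0).toNat).sum])
      simp only [Int.sub_zero] at this ⊢
      rw [this]
      simp
    · have hc' : ¬ times.toNat < l.length := by omega
      rw [if_neg hc, if_neg hc']

-- ===== VERDICT (by name: the statement is the Claim_ definition above) =====
theorem reduceList_spec : Claim_equal_reduceList := by
  intro list times _
  unfold Spec_reduceList reduceList reduceList_alt
  by_cases h : times < 0
  · rw [if_pos h]
    exact foldA_neg times h list 0 0 [] le_rfl
  · rw [if_neg h]
    exact foldA_eq_altGo times (by omega) list []
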